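-- pv_equiv track=rewrite | github.com/prjct404/Phonemizer | Parsivar/Parsivar/normalizer.py | make_word
-- ===== SOURCE A (Python) =====
-- import copy
--
-- def make_word(chp):
--     word_list = [[]]
--     for char in chp:
--         word_list_temp = []
--         for tmp_word_list in word_list:
--             for chch in char:
--                 tmp = copy.deepcopy(tmp_word_list)
--                 tmp.append(chch)
--                 word_list_temp.append(tmp)
--         word_list = word_list_temp
--     return word_list
-- ===== SOURCE B (Python) =====
-- def make_word(chp):
--     if not chp:
--         return [[]]
--     rest_products = make_word(chp[1:])
--     return [[chch] + sub for chch in chp[0] for sub in rest_products]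
-- ===== Notes on version B (the rewrite author's own statement) =====
-- stated objective: simpler
-- what changed: Replaced the iterative triple-nested loop with deepcopy-based list rebuilding by a direct recursion on the list of groups (base [[]], then prefix each element of the first group onto each product of the rest), building fresh lists by concatenation.
import Mathlib
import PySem

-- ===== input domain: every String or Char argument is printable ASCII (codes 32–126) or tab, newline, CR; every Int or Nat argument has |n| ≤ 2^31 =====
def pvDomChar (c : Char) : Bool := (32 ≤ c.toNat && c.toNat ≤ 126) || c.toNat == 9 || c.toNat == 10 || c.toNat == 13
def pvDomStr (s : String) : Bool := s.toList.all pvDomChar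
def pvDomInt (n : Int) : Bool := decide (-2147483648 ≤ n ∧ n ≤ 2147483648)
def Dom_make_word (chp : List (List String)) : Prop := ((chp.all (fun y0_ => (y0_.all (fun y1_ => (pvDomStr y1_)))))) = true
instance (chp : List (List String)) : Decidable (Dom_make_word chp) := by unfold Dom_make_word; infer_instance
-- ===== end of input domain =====

-- B is a recursion on the groups (first group × products of the rest) instead of A's
-- iterative rebuild with deepcopy; same values, simpler decomposition.

-- ===== PORT A =====
-- literal transliteration: the three nested loops become three nested folds over the same state
def make_word (chp : List (List String)) : List (List String) :=
  chp.foldl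
    (fun word_list char =>
      word_list.foldl
        (fun word_list_temp tmp_word_list =>
          char.foldl (fun acc chch => acc ++ [tmp_word_list ++ [chch]]) word_list_temp)
        [])
    [[]]

-- ===== PORT B =====
def make_word_alt : List (List String) → List (List String)
  | [] => [[]]
  | g :: rest =>
    let rest_products := make_word_alt rest
    g.flatMap (fun chch => rest_products.map (fun sub => chch :: sub))

-- ===== PRECONDITION & SPEC =====
def Spec_make_word (chp : List (List String)) (out : List (List String)) : Prop := out = make_word_alt chp
instance (chp : List (List String)) (out : List (List String)) : Decidable (Spec_make_word chp out) := by unfold Spec_make_word; infer_instance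

-- ===== CLAIM (what is proved, stated in full; the proofs are below) =====
def Claim_equal_make_word : Prop := ∀ (chp : List (List String)), Dom_make_word chp → Spec_make_word chp (make_word chp)

-- ===== LEMMAS AND PROOFS =====

-- the inner fold over one group: appending one extension per character
theorem inner_fold_eq (char : List String) (t : List String) (acc : List (List String)) :
    char.foldl (fun a chch => a ++ [t ++ [chch]]) acc
      = acc ++ char.map (fun chch => t ++ [chch]) := by
  induction char generalizing acc with
  | nil => simp
  | cons c cs ih => simp [List.foldl, ih]

-- the middle fold over the current word_list
theorem middle_fold_eq (wl : List (List String)) (char : List String) :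
    wl.foldl
      (fun word_list_temp tmp_word_list =>
        char.foldl (fun acc chch => acc ++ [tmp_word_list ++ [chch]]) word_list_temp)
      []
      = wl.flatMap (fun t => char.map (fun chch => t ++ [chch])) := by
  suffices h : ∀ acc, wl.foldl
      (fun word_list_temp tmp_word_list =>
        char.foldl (fun a chch => a ++ [tmp_word_list ++ [chch]]) word_list_temp)
      acc = acc ++ wl.flatMap (fun t => char.map (fun chch => t ++ [chch])) by
    simpa using h []
  induction wl with
  | nil => simp
  | cons t ts ih =>
    intro acc
    rw [List.foldl_cons, ih, inner_fold_eq, List.append_assoc]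
    simp

-- loop invariant: the outer fold from any word_list is word_list ⋈ the recursive products
theorem outer_fold_eq (chp : List (List String)) (wl : List (List String)) :
    chp.foldl
      (fun word_list char =>
        word_list.foldl
          (fun word_list_temp tmp_word_list =>
            char.foldl (fun acc chch => acc ++ [tmp_word_list ++ [chch]]) word_list_temp)
          [])
      wl
      = wl.flatMap (fun p => (make_word_alt chp).map (fun s => p ++ s)) := by
  induction chp generalizing wl with
  | nil => simp [make_word_alt]
  | cons g rest ih =>
    rw [List.foldl_cons, middle_fold_eq, ih]
    simp [make_word_alt, List.flatMap_assoc, List.flatMap_map, List.map_flatMap,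
      List.map_map, Function.comp_def, List.append_assoc]

-- ===== VERDICT (by name: the statement is the Claim_ definition above) =====
theorem make_word_spec : Claim_equal_make_word := by
  intro chp _
  unfold Spec_make_word make_word
  rw [outer_fold_eq]
  simp
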